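-- pv_equiv track=rewrite | github.com/csmith49/sieve | sieve/arxiv.py | search_url
-- ===== SOURCE A (Python) =====
-- def html_escaping(string: str) -> str:
--     """
--     Replaces certain characters in the input string with their escaped HTML equivalent.
--     """
--     replacements = [('"', "%22"), (" ", "+"), ("(", "%28"), (")", "%29")]
--
--     for source, destination in replacements:
--         string = string.replace(source, destination)
--
--     return string
--
-- def search_url(query_string: str, page: int = 0, max_results: int = 1000) -> str:
--     """
--     Generate a URL with the provided parameters according to arXiv's API.
--
--     Args:
--         query_string (str): Query string, follows the arXiv API (with unescaped special characters).
--
--         page (int, default=0): The page of results to grab.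
--
--         max_results (int, default=1000): Maximum number of entries per page.
--
--     Returns:
--         str: A URL encoding the provided parameters according to the API.
--     """
--     kwargs = {
--         "search_query": html_escaping(query_string),
--         "sortBy": "submittedDate",
--         "sortOrder": "descending",
--         "start": page * max_results,
--         "max_results": max_results,
--     }
--     kwarg_string = "&".join(f"{key}={value}" for key, value in kwargs.items())
--     return f"http://export.arxiv.org/api/query?{kwarg_string}"
-- ===== SOURCE B (Python) =====
-- def search_url(query_string: str, page: int = 0, max_results: int = 1000) -> str:
--     mapping = {'"': "%22", ' ': "+", '(': "%28", ')': "%29"}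
--     escaped = "".join(mapping.get(ch, ch) for ch in query_string)
--     return (
--         "http://export.arxiv.org/api/query?search_query=" + escaped
--         + "&sortBy=submittedDate&sortOrder=descending"
--         + "&start=" + str(page * max_results)
--         + "&max_results=" + str(max_results)
--     )
-- ===== Notes on version B (the rewrite author's own statement) =====
-- stated objective: alternative
-- what changed: Escaping is done in one pass over the characters with a mapping-dict lookup instead of four successive full-string replace passes, and the URL is assembled by direct concatenation of literal fragments instead of building a dict and joining formatted key=value items.
import Mathlib
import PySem

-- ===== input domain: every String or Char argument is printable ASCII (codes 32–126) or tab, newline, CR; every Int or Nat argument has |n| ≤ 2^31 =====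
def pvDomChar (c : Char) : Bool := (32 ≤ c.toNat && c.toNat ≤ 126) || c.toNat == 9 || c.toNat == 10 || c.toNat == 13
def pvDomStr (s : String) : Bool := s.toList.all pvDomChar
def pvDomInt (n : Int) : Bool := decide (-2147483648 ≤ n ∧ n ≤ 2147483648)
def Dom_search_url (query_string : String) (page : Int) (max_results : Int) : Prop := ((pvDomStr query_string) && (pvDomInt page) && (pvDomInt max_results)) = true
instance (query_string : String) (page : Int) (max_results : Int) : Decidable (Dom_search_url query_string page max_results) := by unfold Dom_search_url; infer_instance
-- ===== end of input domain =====

-- B escapes in one pass over the characters with a mapping-dict lookup instead of A's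
-- four successive full-string replace passes, and assembles the URL by direct
-- concatenation instead of joining a dict's formatted items (alternative decomposition).


-- ===== PORT A =====
def html_escaping (string : String) : String :=
  let replacements : List (String × String) :=
    [("\"", "%22"), (" ", "+"), ("(", "%28"), (")", "%29")]
  replacements.foldl (fun string sd => PySem.Str.replace string sd.1 sd.2) string

def search_url (query_string : String) (page : Int) (max_results : Int) : String :=
  let kwargs : PySem.Dict String String :=
    ((((PySem.Dict.empty.insert "search_query" (html_escaping query_string)).insert
        "sortBy" "submittedDate").insert
        "sortOrder" "descending").insert
        "start" (PySem.Int.toStr (page * max_results))).insert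
        "max_results" (PySem.Int.toStr max_results)
  let kwarg_string : String :=
    PySem.Str.join "&" (kwargs.items.map (fun kv => kv.1 ++ "=" ++ kv.2))
  "http://export.arxiv.org/api/query?" ++ kwarg_string

-- ===== PORT B =====
def search_url_alt (query_string : String) (page : Int) (max_results : Int) : String :=
  let mapping : PySem.Dict Char String :=
    PySem.Dict.ofList [('"', "%22"), (' ', "+"), ('(', "%28"), (')', "%29")]
  let escaped : String :=
    PySem.Str.join "" (query_string.toList.map (fun ch => mapping.getD ch (String.ofList [ch])))
  "http://export.arxiv.org/api/query?search_query=" ++ escaped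
    ++ "&sortBy=submittedDate&sortOrder=descending"
    ++ "&start=" ++ PySem.Int.toStr (page * max_results)
    ++ "&max_results=" ++ PySem.Int.toStr max_results

-- ===== PRECONDITION & SPEC =====
def Spec_search_url (query_string : String) (page : Int) (max_results : Int) (out : String) : Prop := out = search_url_alt query_string page max_results
instance (query_string : String) (page : Int) (max_results : Int) (out : String) : Decidable (Spec_search_url query_string page max_results out) := by unfold Spec_search_url; infer_instance

-- ===== CLAIM (what is proved, stated in full; the proofs are below) =====
def Claim_equal_search_url : Prop := ∀ (query_string : String) (page : Int) (max_results : Int), Dom_search_url query_string page max_results → Spec_search_url query_string page max_results (search_url query_string page max_results)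

-- ===== LEMMAS AND PROOFS =====

-- Python's s.replace for a single-character needle is a per-character flatMap.
theorem replace_go_single (a : Char) (new : List Char) :
    ∀ (fuel : Nat) (l acc : List Char), l.length ≤ fuel →
      PySem.Chars.replace.go [a] new fuel l acc
        = acc.reverse ++ l.flatMap (fun c => if c = a then new else [c]) := by
  intro fuel l
  induction l generalizing fuel with
  | nil =>
      intro acc _
      cases fuel <;> simp [PySem.Chars.replace.go]
  | cons c t ih =>
      intro acc hlen
      cases fuel with
      | zero => simp at hlen
      | succ f =>
          simp only [PySem.Chars.replace.go]
          by_cases h : c = a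
          · subst h
            rw [if_pos (by simp [List.isPrefixOf])]
            rw [show List.drop [c].length (c :: t) = t from rfl]
            rw [ih f (new.reverse ++ acc) (by simpa using Nat.lt_succ_iff.mp (by simpa using hlen))]
            simp
          · rw [if_neg (by simp [List.isPrefixOf]; exact fun hac => h hac.symm)]
            rw [ih f (c :: acc) (by simpa using Nat.lt_succ_iff.mp (by simpa using hlen))]
            simp [h]

theorem replace_single (s : List Char) (a : Char) (new : List Char) :
    PySem.Chars.replace s [a] new
      = s.flatMap (fun c => if c = a then new else [c]) := by
  simp only [PySem.Chars.replace, List.isEmpty_cons, Bool.false_eq_true, if_false]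
  exact replace_go_single a new s.length s [] le_rfl

theorem html_escaping_toList (q : String) :
    (html_escaping q).toList
      = q.toList.flatMap (fun c =>
          if c = '"' then ['%','2','2'] else if c = ' ' then ['+']
          else if c = '(' then ['%','2','8'] else if c = ')' then ['%','2','9'] else [c]) := by
  show (PySem.Str.replace (PySem.Str.replace (PySem.Str.replace (PySem.Str.replace q "\"" "%22") " " "+") "(" "%28") ")" "%29").toList = _
  simp only [PySem.Str.toList_replace]
  show PySem.Chars.replace (PySem.Chars.replace (PySem.Chars.replace (PySem.Chars.replace q.toList ['"'] ['%','2','2']) [' '] ['+']) ['('] ['%','2','8']) [')'] ['%','2','9'] = _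
  rw [replace_single, replace_single, replace_single, replace_single]
  simp only [List.flatMap_assoc]
  congr 1
  funext c
  by_cases h1 : c = '"' <;> by_cases h2 : c = ' ' <;> by_cases h3 : c = '(' <;> by_cases h4 : c = ')' <;>
    simp_all

theorem flatten_intersperse_nil (l : List (List Char)) :
    (List.intersperse ([] : List Char) l).flatten = l.flatten := by
  induction l with
  | nil => rfl
  | cons a t ih => cases t <;> simp_all [List.intersperse]

theorem getD_mapping (c : Char) :
    ((PySem.Dict.ofList [('"', "%22"), (' ', "+"), ('(', "%28"), (')', "%29")]).getD c
        (String.ofList [c])).toList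
      = (if c = '"' then ['%','2','2'] else if c = ' ' then ['+']
         else if c = '(' then ['%','2','8'] else if c = ')' then ['%','2','9'] else [c]) := by
  by_cases h1 : c = '"'
  · subst h1; decide
  by_cases h2 : c = ' '
  · subst h2; decide
  by_cases h3 : c = '('
  · subst h3; decide
  by_cases h4 : c = ')'
  · subst h4; decide
  have h : (PySem.Dict.ofList [('"', "%22"), (' ', "+"), ('(', "%28"), (')', "%29")])
      = PySem.Dict.mk [('"', "%22"), (' ', "+"), ('(', "%28"), (')', "%29")] := by decide
  rw [h]
  simp only [PySem.Dict.getD, PySem.Dict.get?]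
  rw [List.find?_cons_of_neg (by simpa using Ne.symm h1),
      List.find?_cons_of_neg (by simpa using Ne.symm h2),
      List.find?_cons_of_neg (by simpa using Ne.symm h3),
      List.find?_cons_of_neg (by simpa using Ne.symm h4)]
  simp [h1, h2, h3, h4]

theorem escaped_toList (q : String) :
    (PySem.Str.join "" (q.toList.map (fun ch =>
        (PySem.Dict.ofList [('"', "%22"), (' ', "+"), ('(', "%28"), (')', "%29")]).getD ch (String.ofList [ch])))).toList
      = q.toList.flatMap (fun c =>
          if c = '"' then ['%','2','2'] else if c = ' ' then ['+']
          else if c = '(' then ['%','2','8'] else if c = ')' then ['%','2','9'] else [c]) := by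
  rw [PySem.Str.toList_join]
  have hsep : ("" : String).toList = ([] : List Char) := rfl
  rw [hsep]
  simp only [PySem.Chars.join, List.intercalate, flatten_intersperse_nil, List.map_map]
  rw [← List.flatMap_def]
  exact List.flatMap_congr (fun c _ => getD_mapping c)

theorem items_eq (e s m' : String) :
    (((((PySem.Dict.empty.insert "search_query" e).insert "sortBy" "submittedDate").insert
        "sortOrder" "descending").insert "start" s).insert "max_results" m').items
      = [("search_query", e), ("sortBy", "submittedDate"), ("sortOrder", "descending"),
         ("start", s), ("max_results", m')] := rfl

-- ===== VERDICT (by name: the statement is the Claim_ definition above) =====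
theorem search_url_spec : Claim_equal_search_url := by
  intro q page mr _
  show search_url q page mr = search_url_alt q page mr
  apply String.toList_inj.mp
  simp only [search_url, search_url_alt, items_eq]
  simp only [String.toList_append, escaped_toList]
  simp only [PySem.Str.toList_join, List.map_cons, List.map_nil, String.toList_append]
  simp [PySem.Chars.join, List.intercalate, List.intersperse, html_escaping_toList,
    List.append_assoc]
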